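-- pv_equiv track=rewrite | github.com/lyty1997/DocRestore | backend/docrestore/processing/dedup.py | _mark_noise_blocks
-- ===== SOURCE A (Python) =====
-- def _normalize_line(line: str) -> str:
--     """归一化行文本：去首尾空白 + 压缩连续空格。"""
--     return " ".join(line.split())
--
-- def _mark_noise_blocks(
--     lines: list[str],
--     noise_lines: set[str],
--     min_block: int,
-- ) -> list[bool]:
--     """标记需要移除的连续噪声行块。
--
--     扫描 lines，将连续 ≥ min_block 行的噪声块标记为 True。
--
--     Args:
--         lines: 页面文本行列表
--         noise_lines: 已识别的噪声行集合（归一化后）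
--         min_block: 连续噪声行最小块大小
--
--     Returns:
--         与 lines 等长的布尔列表，True 表示该行应被移除
--     """
--     is_noise = [_normalize_line(line) in noise_lines for line in lines]
--     remove = [False] * len(lines)
--     block_start = -1
--
--     for i, noisy in enumerate(is_noise):
--         if noisy:
--             if block_start < 0:
--                 block_start = i
--         else:
--             if block_start >= 0 and (i - block_start) >= min_block:
--                 for j in range(block_start, i):
--                     remove[j] = True
--             block_start = -1
--
--     # 处理末尾的连续块
--     if block_start >= 0 and (len(lines) - block_start) >= min_block:
--         for j in range(block_start, len(lines)):
--             remove[j] = True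
--
--     return remove
-- ===== SOURCE B (Python) =====
-- def _normalize_line(line: str) -> str:
--     return " ".join(line.split())
--
-- def _mark_noise_blocks(lines, noise_lines, min_block):
--     # Per-position run-length DP: a backward counting pass gives the length of
--     # the noise run starting at each index, a forward pass propagates each
--     # run's total length to all of its members; a line is removed iff it is
--     # noise and its run's total length reaches min_block.  No run boundaries
--     # or start sentinel are tracked.
--     is_noise = [_normalize_line(line) in noise_lines for line in lines]
--     # backward pass: right[i] = length of the noise run starting at i (0 if not noise)
--     right = []
--     for b in reversed(is_noise):
--         right.append((right[-1] + 1 if right else 1) if b else 0)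
--     right.reverse()
--     # forward pass: each noise line inherits the full run length from its predecessor
--     full = []
--     prev = None  # full value of the previous line if that line was noise
--     for b, r in zip(is_noise, right):
--         f = (prev if prev is not None else r) if b else 0
--         full.append(f)
--         prev = f if b else None
--     return [b and f >= min_block for b, f in zip(is_noise, full)]
-- ===== Notes on version B (the rewrite author's own statement) =====
-- stated objective: alternative
-- what changed: Replaces A's stateful run scan (block_start sentinel, in-place marking when a run closes, separate trailing-run fixup) by a per-position run-length dynamic program: a backward pass counts the noise-run length starting at each index, a forward pass propagates each run's total length to all its members, and a final comprehension removes a line iff it is noise and its run length reaches min_block.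
import Mathlib
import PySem

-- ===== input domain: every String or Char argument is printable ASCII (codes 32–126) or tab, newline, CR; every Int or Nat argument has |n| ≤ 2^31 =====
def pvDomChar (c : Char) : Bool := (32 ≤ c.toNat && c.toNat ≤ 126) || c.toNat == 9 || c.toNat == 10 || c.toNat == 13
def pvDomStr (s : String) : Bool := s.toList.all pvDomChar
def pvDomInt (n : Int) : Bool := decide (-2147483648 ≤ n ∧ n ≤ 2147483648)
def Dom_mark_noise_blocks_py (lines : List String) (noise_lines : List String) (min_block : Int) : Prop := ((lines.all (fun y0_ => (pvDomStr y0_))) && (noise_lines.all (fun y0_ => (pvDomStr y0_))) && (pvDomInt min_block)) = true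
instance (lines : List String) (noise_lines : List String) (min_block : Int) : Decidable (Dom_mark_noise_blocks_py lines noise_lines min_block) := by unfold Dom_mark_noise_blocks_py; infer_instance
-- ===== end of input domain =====

-- B replaces A's sentinel-based run scan by a two-pass per-position run-length
-- dynamic program (backward run counting, forward propagation); alternative decomposition.


-- ===== PORT A =====
-- _normalize_line: " ".join(line.split())
def pvNorm (line : String) : String := PySem.Str.join " " (PySem.Str.split₀ line)

-- body of the for-loop over enumerate(is_noise) (state = (remove, block_start))
def pvAStep (min_block : Int) (st : List Bool × Int) (p : Int × Bool) : List Bool × Int :=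
  if p.2 then
    if st.2 < 0 then (st.1, p.1) else st
  else
    if st.2 ≥ 0 ∧ p.1 - st.2 ≥ min_block then
      ((PySem.List.pyRange st.2 p.1 1).foldl (fun r j => PySem.List.pySetD r j true) st.1, -1)
    else (st.1, -1)

-- the trailing-block fixup after the loop (n = len(lines))
def pvAFinish (min_block : Int) (n : Int) (st : List Bool × Int) : List Bool :=
  if st.2 ≥ 0 ∧ n - st.2 ≥ min_block then
    (PySem.List.pyRange st.2 n 1).foldl (fun r j => PySem.List.pySetD r j true) st.1
  else st.1

def mark_noise_blocks_py (lines : List String) (noise_lines : List String) (min_block : Int) : List Bool :=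
  let is_noise := lines.map (fun line => PySem.Set.contains noise_lines (pvNorm line))
  let remove := List.replicate lines.length false
  let st := (PySem.List.enumerate is_noise 0).foldl (pvAStep min_block) (remove, -1)
  pvAFinish min_block (lines.length : Int) st

-- ===== PORT B =====
-- backward pass: right[i] = length of the noise run starting at i (0 if not noise)
def pvRight : List Bool → List Int
  | [] => []
  | b :: rest => (if b then (pvRight rest).headD 0 + 1 else 0) :: pvRight rest

-- forward pass: prev = full value of the previous line if that line was noise
def pvFull : Option Int → List (Bool × Int) → List Int
  | _, [] => []
  | prev, (b, r) :: rest =>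
    if b then (prev.getD r) :: pvFull (some (prev.getD r)) rest
    else 0 :: pvFull none rest

def mark_noise_blocks_py_alt (lines : List String) (noise_lines : List String) (min_block : Int) : List Bool :=
  let is_noise := lines.map (fun line => PySem.Set.contains noise_lines (pvNorm line))
  let right := pvRight is_noise
  let full := pvFull none (is_noise.zip right)
  List.zipWith (fun b f => b && decide (min_block ≤ f)) is_noise full

-- ===== PRECONDITION & SPEC =====
def Spec_mark_noise_blocks_py (lines : List String) (noise_lines : List String) (min_block : Int) (out : List Bool) : Prop := out = mark_noise_blocks_py_alt lines noise_lines min_block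
instance (lines : List String) (noise_lines : List String) (min_block : Int) (out : List Bool) : Decidable (Spec_mark_noise_blocks_py lines noise_lines min_block out) := by unfold Spec_mark_noise_blocks_py; infer_instance

-- ===== CLAIM (what is proved, stated in full; the proofs are below) =====
def Claim_equal_mark_noise_blocks_py : Prop := ∀ (lines : List String) (noise_lines : List String) (min_block : Int), Dom_mark_noise_blocks_py lines noise_lines min_block → Spec_mark_noise_blocks_py lines noise_lines min_block (mark_noise_blocks_py lines noise_lines min_block)

-- ===== LEMMAS AND PROOFS =====

-- abstract form of the result: pending = length of the noise run currently open
def pvAbs (mb : Int) : List Bool → Nat → List Bool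
  | [], p => List.replicate p (decide (mb ≤ (p : Int)))
  | true :: rest, p => pvAbs mb rest (p + 1)
  | false :: rest, p =>
      List.replicate p (decide (mb ≤ (p : Int))) ++ false :: pvAbs mb rest 0

lemma pvSetRange (k : Nat) : ∀ (acc tail : List Bool),
    (PySem.List.pyRange (acc.length : Int) ((acc.length : Int) + (k : Int)) 1).foldl
        (fun r j => PySem.List.pySetD r j true) (acc ++ List.replicate k false ++ tail)
      = acc ++ List.replicate k true ++ tail := by
  induction k with
  | zero =>
    intro acc tail
    rw [PySem.List.pyRange_one_eq_nil (by omega)]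
    simp
  | succ k ih =>
    intro acc tail
    rw [PySem.List.pyRange_one_cons (by omega)]
    simp only [List.foldl_cons]
    have h1 : PySem.List.pySetD (acc ++ List.replicate (k+1) false ++ tail) (acc.length : Int) true
        = (acc ++ [true]) ++ List.replicate k false ++ tail := by
      simp [List.replicate_succ]
    rw [h1]
    have h2 : ((acc.length : Int) + 1) = ((acc ++ [true]).length : Int) := by simp
    have h3 : ((acc.length : Int) + ((k+1 : Nat) : Int)) = (((acc ++ [true]).length : Int) + (k : Int)) := by
      simp; omega
    rw [h2, h3, ih]
    simp [List.replicate_succ]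

lemma pvAInv (mb : Int) (bs : List Bool) : ∀ (p : Nat) (acc : List Bool),
    pvAFinish mb ((acc.length : Int) + (p : Int) + (bs.length : Int))
      ((PySem.List.enumerate bs ((acc.length : Int) + (p : Int))).foldl (pvAStep mb)
        (acc ++ List.replicate (p + bs.length) false,
         if p = 0 then -1 else (acc.length : Int)))
      = acc ++ pvAbs mb bs p := by
  induction bs with
  | nil =>
    intro p acc
    simp only [PySem.List.enumerate_nil, List.foldl_nil, List.length_nil, Nat.cast_zero,
      Int.add_zero, Nat.add_zero, pvAbs]
    cases p with
    | zero => simp [pvAFinish]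
    | succ q =>
      simp only [Nat.succ_ne_zero, reduceIte]
      unfold pvAFinish
      by_cases hmb : mb ≤ ((q+1 : Nat) : Int)
      · rw [if_pos (by constructor <;> omega)]
        have hset := pvSetRange (q+1) acc []
        simp only [List.append_nil] at hset
        rw [hset]
        have hmb' : mb ≤ (q : Int) + 1 := by push_cast at hmb ⊢; omega
        simp [hmb']
      · rw [if_neg (by omega)]
        have hmb' : (q : Int) + 1 < mb := by push_cast at hmb ⊢; omega
        simp [hmb']
  | cons nb rest ih =>
    intro p acc
    rw [PySem.List.enumerate_cons]
    simp only [List.foldl_cons]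
    cases nb with
    | true =>
      have hstep : pvAStep mb (acc ++ List.replicate (p + (true :: rest).length) false,
            if p = 0 then -1 else (acc.length : Int)) ((acc.length : Int) + (p : Int), true)
          = (acc ++ List.replicate ((p+1) + rest.length) false,
             if (p+1) = 0 then -1 else (acc.length : Int)) := by
        cases p with
        | zero => simp [pvAStep]; omega
        | succ q =>
          simp only [pvAStep, Nat.succ_ne_zero, reduceIte, List.length_cons]
          rw [if_neg (by omega)]
          simp [show q + 1 + (rest.length + 1) = q + 1 + 1 + rest.length from by omega]
      rw [hstep]
      have harg : (acc.length : Int) + (p : Int) + 1 = (acc.length : Int) + ((p+1 : Nat) : Int) := by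
        push_cast; ring
      have hlen : (acc.length : Int) + (p : Int) + (((true :: rest).length : Nat) : Int)
          = (acc.length : Int) + ((p+1 : Nat) : Int) + ((rest.length : Nat) : Int) := by
        simp; omega
      rw [harg, hlen, ih (p+1) acc]
      rfl
    | false =>
      cases p with
      | zero =>
        have hstep : pvAStep mb (acc ++ List.replicate (0 + (false :: rest).length) false, -1)
              ((acc.length : Int) + ((0:Nat) : Int), false)
            = ((acc ++ [false]) ++ List.replicate (0 + rest.length) false, -1) := by
          simp [pvAStep, List.replicate_succ]
        simp only [reduceIte] at *
        rw [hstep]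
        have h2 : (acc.length : Int) + ((0:Nat):Int) + 1 = (((acc ++ [false]).length : Int) + ((0:Nat):Int)) := by
          simp
        have h3 : (acc.length : Int) + ((0:Nat):Int) + (((false :: rest).length : Nat) : Int)
            = ((acc ++ [false]).length : Int) + ((0:Nat):Int) + ((rest.length : Nat) : Int) := by
          simp; ring
        rw [h2, h3]
        have hih := ih 0 (acc ++ [false])
        simp only [reduceIte] at hih
        rw [hih]
        simp [pvAbs]
      | succ q =>
        by_cases hmb : mb ≤ ((q+1 : Nat) : Int)
        · -- completed block long enough: range gets marked true
          have hstep : pvAStep mb (acc ++ List.replicate ((q+1) + (false :: rest).length) false,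
                if (q+1) = 0 then -1 else (acc.length : Int)) ((acc.length : Int) + ((q+1:Nat) : Int), false)
              = ((acc ++ List.replicate (q+1) true ++ [false]) ++ List.replicate (0 + rest.length) false, -1) := by
            unfold pvAStep
            simp only [Nat.succ_ne_zero, reduceIte]
            rw [if_neg (by simp), if_pos (by exact ⟨by omega, by omega⟩)]
            have hsplit : List.replicate ((q+1) + (false :: rest).length) false
                = List.replicate (q+1) false ++ List.replicate ((false :: rest).length) false := by
              rw [← List.replicate_add]
            rw [hsplit, ← List.append_assoc]
            rw [pvSetRange (q+1) acc (List.replicate ((false :: rest).length) false)]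
            simp [List.replicate_succ]
          rw [hstep]
          have h2 : (acc.length : Int) + ((q+1:Nat):Int) + 1
              = (((acc ++ List.replicate (q+1) true ++ [false]).length : Int) + ((0:Nat):Int)) := by
            simp; ring
          have h3 : (acc.length : Int) + ((q+1:Nat):Int) + (((false :: rest).length : Nat) : Int)
              = ((acc ++ List.replicate (q+1) true ++ [false]).length : Int) + ((0:Nat):Int) + ((rest.length : Nat) : Int) := by
            simp; ring
          rw [h2, h3]
          have hih := ih 0 (acc ++ List.replicate (q+1) true ++ [false])
          simp only [reduceIte] at hih
          rw [hih]
          have hmb' : mb ≤ (q : Int) + 1 := by push_cast at hmb ⊢; omega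
          simp [pvAbs, hmb']
        · -- completed block too short: left false
          have hstep : pvAStep mb (acc ++ List.replicate ((q+1) + (false :: rest).length) false,
                if (q+1) = 0 then -1 else (acc.length : Int)) ((acc.length : Int) + ((q+1:Nat) : Int), false)
              = ((acc ++ List.replicate (q+1) false ++ [false]) ++ List.replicate (0 + rest.length) false, -1) := by
            unfold pvAStep
            simp only [Nat.succ_ne_zero, reduceIte]
            rw [if_neg (by simp), if_neg (by push_cast at hmb ⊢; omega)]
            have hsplit : (q+1) + (false :: rest).length = ((q+1) + 1) + (0 + rest.length) := by
              simp; omega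
            rw [hsplit, List.replicate_add, ← List.append_assoc]
            simp [List.replicate_succ']
          rw [hstep]
          have h2 : (acc.length : Int) + ((q+1:Nat):Int) + 1
              = (((acc ++ List.replicate (q+1) false ++ [false]).length : Int) + ((0:Nat):Int)) := by
            simp; ring
          have h3 : (acc.length : Int) + ((q+1:Nat):Int) + (((false :: rest).length : Nat) : Int)
              = ((acc ++ List.replicate (q+1) false ++ [false]).length : Int) + ((0:Nat):Int) + ((rest.length : Nat) : Int) := by
            simp; ring
          rw [h2, h3]
          have hih := ih 0 (acc ++ List.replicate (q+1) false ++ [false])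
          simp only [reduceIte] at hih
          rw [hih]
          have hmb' : (q : Int) + 1 < mb := by push_cast at hmb ⊢; omega
          simp [pvAbs, hmb']

lemma pvAbsTrue (mb : Int) (k : Nat) : ∀ (rest : List Bool) (p : Nat),
    pvAbs mb (List.replicate k true ++ rest) p = pvAbs mb rest (p + k) := by
  induction k with
  | zero => intro rest p; simp
  | succ k ih =>
    intro rest p
    simp only [List.replicate_succ, List.cons_append, pvAbs]
    rw [ih]
    congr 1
    omega

lemma pvAbsFlush (mb : Int) (d : List Bool) (p : Nat)
    (h : d = [] ∨ ∃ tl, d = false :: tl) :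
    pvAbs mb d p = List.replicate p (decide (mb ≤ (p : Int))) ++ pvAbs mb d 0 := by
  rcases h with h | ⟨tl, h⟩ <;> subst h <;> simp [pvAbs]

lemma pvTakeWhileRepl (rest : List Bool) (b : Bool) :
    rest.takeWhile (· == b) = List.replicate (rest.takeWhile (· == b)).length b := by
  apply List.eq_replicate_of_mem
  intro x hx
  have := List.mem_takeWhile_imp hx
  simpa using this

-- [k, k-1, …, 1] : the values of the backward pass along a noise run of length k
def pvDesc : Nat → List Int
  | 0 => []
  | k + 1 => ((k : Int) + 1) :: pvDesc k

lemma pvDesc_length (k : Nat) : (pvDesc k).length = k := by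
  induction k with
  | zero => rfl
  | succ k ih => simp [pvDesc, ih]

lemma pvRight_headD_zero (d : List Bool) (h : d = [] ∨ ∃ tl, d = false :: tl) :
    (pvRight d).headD 0 = 0 := by
  rcases h with h | ⟨tl, h⟩ <;> subst h <;> simp [pvRight]

lemma pvRight_run (d : List Bool) (hd : (pvRight d).headD 0 = 0) :
    ∀ (k : Nat), pvRight (List.replicate k true ++ d) = pvDesc k ++ pvRight d := by
  intro k
  induction k with
  | zero => simp [pvDesc]
  | succ k ih =>
    simp only [List.replicate_succ, List.cons_append, pvRight, ih]
    cases k with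
    | zero => simp only [pvDesc, List.nil_append]; simpa using hd
    | succ j => simp [pvDesc]

lemma pvFull_true (prev : Option Int) (r : Int) (rest : List (Bool × Int)) :
    pvFull prev ((true, r) :: rest) = (prev.getD r) :: pvFull (some (prev.getD r)) rest := by
  simp [pvFull]

lemma pvFull_const (c : Int) : ∀ (m : Nat) (l : List Int) (t : List (Bool × Int)),
    l.length = m →
    pvFull (some c) ((List.replicate m true).zip l ++ t) = List.replicate m c ++ pvFull (some c) t := by
  intro m
  induction m with
  | zero =>
    intro l t hl
    rw [List.length_eq_zero_iff] at hl
    subst hl; simp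
  | succ m ih =>
    intro l t hl
    cases l with
    | nil => simp at hl
    | cons x l' =>
      simp only [List.replicate_succ, List.zip_cons_cons, List.cons_append, pvFull_true,
        Option.getD_some]
      simp only [List.length_cons, Nat.succ.injEq] at hl
      rw [ih l' t hl]

lemma pvFull_reset (prev : Option Int) (d : List Bool)
    (h : d = [] ∨ ∃ tl, d = false :: tl) :
    pvFull prev (d.zip (pvRight d)) = pvFull none (d.zip (pvRight d)) := by
  rcases h with h | ⟨tl, h⟩ <;> subst h <;> simp [pvRight, pvFull]

lemma pvBEq (mb : Int) : ∀ (n : Nat) (bs : List Bool), bs.length ≤ n →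
    List.zipWith (fun b f => b && decide (mb ≤ f)) bs (pvFull none (bs.zip (pvRight bs)))
      = pvAbs mb bs 0 := by
  intro n
  induction n with
  | zero =>
    intro bs hbs
    rw [Nat.le_zero, List.length_eq_zero_iff] at hbs
    subst hbs; simp [pvAbs]
  | succ n ih =>
    intro bs hbs
    cases bs with
    | nil => simp [pvAbs]
    | cons b rest =>
      cases b with
      | false =>
        simp only [pvRight, if_neg Bool.false_ne_true, List.zip_cons_cons, pvFull,
          List.zipWith_cons_cons, Bool.false_and]
        rw [ih rest (by simpa using Nat.lt_succ_iff.mp (Nat.lt_of_lt_of_le (by simp) hbs))]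
        simp [pvAbs]
      | true =>
        -- decompose the leading maximal noise run
        set k' := (rest.takeWhile (· == true)).length with hk'
        have hdecomp : rest = List.replicate k' true ++ rest.dropWhile (· == true) := by
          conv_lhs => rw [← List.takeWhile_append_dropWhile (p := (· == true)) (l := rest)]
          rw [← pvTakeWhileRepl]
        set d := rest.dropWhile (· == true) with hdd
        have hdropHead : ∀ (l : List Bool) (x : Bool) (tl : List Bool),
            l.dropWhile (· == true) = x :: tl → x = false := by
          intro l
          induction l with
          | nil => intro x tl h; simp at h
          | cons y ys ihy =>
            intro x tl h
            by_cases hy : (y == true) = true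
            · rw [List.dropWhile_cons_of_pos (by simpa using hy)] at h
              exact ihy x tl h
            · rw [List.dropWhile_cons_of_neg (by simpa using hy)] at h
              cases h
              simpa using hy
        have hshape : d = [] ∨ ∃ tl, d = false :: tl := by
          cases hca : d with
          | nil => exact Or.inl rfl
          | cons x tl =>
            have h1 : rest.dropWhile (· == true) = x :: tl := by rw [← hdd]; exact hca
            have hx := hdropHead rest x tl h1
            exact Or.inr ⟨tl, by rw [hx]⟩
        have hrhd : (pvRight d).headD 0 = 0 := pvRight_headD_zero d hshape
        -- full list along true :: rest
        have hbs' : (true :: rest) = List.replicate (k' + 1) true ++ d := by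
          rw [List.replicate_succ, List.cons_append, ← hdecomp]
        rw [hbs']
        rw [pvRight_run d hrhd (k' + 1)]
        have hzip : (List.replicate (k' + 1) true ++ d).zip (pvDesc (k' + 1) ++ pvRight d)
            = (List.replicate (k' + 1) true).zip (pvDesc (k' + 1)) ++ d.zip (pvRight d) := by
          apply List.zip_append
          simp [pvDesc_length]
        rw [hzip]
        have hfull : pvFull none ((List.replicate (k' + 1) true).zip (pvDesc (k' + 1)) ++ d.zip (pvRight d))
            = List.replicate (k' + 1) ((k' : Int) + 1) ++ pvFull none (d.zip (pvRight d)) := by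
          simp only [List.replicate_succ, pvDesc, List.zip_cons_cons, List.cons_append,
            pvFull_true, Option.getD_none]
          rw [pvFull_const ((k' : Int) + 1) k' (pvDesc k') _ (pvDesc_length k')]
          rw [pvFull_reset (some ((k' : Int) + 1)) d hshape]
        rw [hfull]
        have hzw : List.zipWith (fun b f => b && decide (mb ≤ f))
              (List.replicate (k' + 1) true ++ d)
              (List.replicate (k' + 1) ((k' : Int) + 1) ++ pvFull none (d.zip (pvRight d)))
            = List.replicate (k' + 1) (decide (mb ≤ (k' : Int) + 1))
              ++ List.zipWith (fun b f => b && decide (mb ≤ f)) d (pvFull none (d.zip (pvRight d))) := by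
          rw [List.zipWith_append (by simp)]
          congr 1
          rw [List.zipWith_replicate]
          simp
        rw [hzw]
        have hdlen : d.length ≤ n := by
          have := hbs
          rw [hbs'] at this
          simp only [List.length_append, List.length_replicate] at this
          omega
        rw [ih d hdlen]
        -- RHS
        rw [pvAbsTrue mb (k' + 1) d 0, pvAbsFlush mb d (0 + (k' + 1)) hshape]
        simp

-- ===== VERDICT (by name: the statement is the Claim_ definition above) =====
theorem mark_noise_blocks_py_spec : Claim_equal_mark_noise_blocks_py := by
  intro lines noise_lines mb _
  unfold Spec_mark_noise_blocks_py mark_noise_blocks_py mark_noise_blocks_py_alt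
  have h := pvAInv mb (lines.map (fun line => PySem.Set.contains noise_lines (pvNorm line))) 0 []
  simp only [List.length_nil, Nat.cast_zero, List.nil_append, Int.zero_add, Nat.zero_add,
    List.length_map] at h
  exact h.trans (pvBEq mb (lines.map (fun line => PySem.Set.contains noise_lines (pvNorm line))).length _ (le_refl _)).symm
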